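-- pv_equiv track=rewrite | github.com/hempgreens/nouzen | nouzen.py | make_jump_table
-- ===== SOURCE A (Python) =====
-- def make_jump_table(parsed_data):
--     jump_table = {}
--     cond_buffer = []
--     jump_buffer = []
--     loop_buffer = []
--     for i, word in enumerate(parsed_data):
--         if(word == "("):
--             cond_buffer.append(i)
--         elif(word == ")"):
--             jump_table[cond_buffer.pop()] = i
--         if(word == "["):
--             jump_buffer.append(i)
--         elif(word == "]"):
--             jump_table[jump_buffer.pop()] = i
--         if(word == "{"):
--             loop_buffer.append(i)
--         elif(word == "}"):
--             jump_table[i] = loop_buffer.pop()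
--     return jump_table
-- ===== SOURCE B (Python) =====
-- def make_jump_table(parsed_data):
--     """Map each bracket to its partner: open->close for () and [], close->open for {}."""
--     closer_to_opener = {")": "(", "]": "[", "}": "{"}
--     table = {}
--     for i, word in enumerate(parsed_data):
--         if word not in closer_to_opener:
--             continue
--         opener = closer_to_opener[word]
--         depth = 0
--         for j in reversed(range(i)):
--             w = parsed_data[j]
--             if w == word:
--                 depth += 1
--             elif w == opener:
--                 if depth == 0:
--                     break
--                 depth -= 1
--         else:
--             raise IndexError("unmatched " + word)
--         if word == "}":
--             table[i] = j
--         else: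
--             table[j] = i
--     return table
-- ===== Notes on version B (the rewrite author's own statement) =====
-- stated objective: alternative
-- what changed: A's single pass threading a dict and three stacks is replaced by a stack-free matcher: each closing bracket finds its partner on the spot by scanning backward with a depth counter; Pre_ excludes inputs with an unmatched closer, where both raise IndexError.
import Mathlib
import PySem

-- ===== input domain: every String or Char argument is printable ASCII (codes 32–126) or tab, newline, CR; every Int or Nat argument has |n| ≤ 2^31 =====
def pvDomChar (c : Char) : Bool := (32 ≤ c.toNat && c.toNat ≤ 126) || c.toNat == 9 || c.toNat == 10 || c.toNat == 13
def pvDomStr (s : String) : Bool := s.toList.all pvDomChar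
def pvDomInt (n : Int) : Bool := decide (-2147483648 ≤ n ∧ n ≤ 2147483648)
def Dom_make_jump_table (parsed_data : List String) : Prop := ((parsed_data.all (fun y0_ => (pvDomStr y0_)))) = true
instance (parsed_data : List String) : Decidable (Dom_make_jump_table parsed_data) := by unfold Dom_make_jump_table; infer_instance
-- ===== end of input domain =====

-- B replaces A's three explicit stacks by a stack-free matcher: each closing bracket finds
-- its partner by scanning backward with a depth counter (objective: alternative; B is O(n^2)).
-- Unmatched closers make both Pythons raise IndexError; Pre_ excludes exactly those inputs.

-- ===== PORT A =====
-- state: (jump_table, cond_buffer, jump_buffer, loop_buffer); stacks keep the top at the head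
-- (Python appends/pops at the right end).  `none` = IndexError from pop() on an empty list.
def pvAStep (iw : Int × String) (st : PySem.Dict Int Int × List Int × List Int × List Int) :
    Option (PySem.Dict Int Int × List Int × List Int × List Int) :=
  let i := iw.1; let w := iw.2
  -- if word == "(" / elif word == ")"
  (match st with
   | (jt, cb, jb, lb) =>
     if w == "(" then some (jt, i :: cb, jb, lb)
     else if w == ")" then
       match cb with
       | [] => none
       | t :: r => some (jt.insert t i, r, jb, lb)
     else some (jt, cb, jb, lb)).bind (fun st1 =>
  -- if word == "[" / elif word == "]"
  (match st1 with
   | (jt, cb, jb, lb) =>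
     if w == "[" then some (jt, cb, i :: jb, lb)
     else if w == "]" then
       match jb with
       | [] => none
       | t :: r => some (jt.insert t i, cb, r, lb)
     else some (jt, cb, jb, lb)).bind (fun st2 =>
  -- if word == "{" / elif word == "}"
  match st2 with
  | (jt, cb, jb, lb) =>
    if w == "{" then some (jt, cb, jb, i :: lb)
    else if w == "}" then
      match lb with
      | [] => none
      | t :: r => some (jt.insert i t, cb, jb, r)
    else some (jt, cb, jb, lb)))

def make_jump_table (parsed_data : List String) : List (Int × Int) :=
  match (PySem.List.enumerate parsed_data 0).foldl
      (fun acc iw => acc.bind (pvAStep iw)) (some (PySem.Dict.empty, [], [], [])) with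
  | some (jt, _, _, _) => jt.items
  | none => []   -- Python raises IndexError here; excluded by Pre_

-- ===== PORT B =====
-- closer_to_opener = {")": "(", "]": "[", "}": "{"}  (dict-literal lookup as an Option)
def pvOpenerOf (w : String) : Option String :=
  if w == ")" then some "("
  else if w == "]" then some "["
  else if w == "}" then some "{"
  else none

-- the inner loop `for j in reversed(range(i))`: n is the number of indices still to try
-- (j = n-1 next); xs[n-1]? is Python's parsed_data[j] (exact: 0 ≤ j < len(xs) here).
-- Python's `depth` stays a nonnegative int (it is decremented only when nonzero), so Nat is exact.
-- `none` = the loop's else-branch: raise IndexError (unmatched closer); excluded by Pre_.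
def pvFind (xs : List String) (word opener : String) : Nat → Nat → Option Int
  | 0, _ => none
  | n + 1, depth =>
    match xs[n]? with
    | none => none   -- unreachable at call sites (n < xs.length)
    | some w =>
      if w == word then pvFind xs word opener n (depth + 1)
      else if w == opener then
        (if depth == 0 then some (n : Int) else pvFind xs word opener n (depth - 1))
      else pvFind xs word opener n depth

-- the outer loop `for i, word in enumerate(parsed_data)` with i carried as a Nat counter
def pvBGo (xs : List String) : List String → Nat → PySem.Dict Int Int →
    Option (PySem.Dict Int Int)
  | [], _, jt => some jt
  | w :: rest, i, jt =>
    match pvOpenerOf w with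
    | none => pvBGo xs rest (i + 1) jt          -- continue
    | some opener =>
      match pvFind xs w opener i 0 with
      | none => none                            -- raise IndexError
      | some j =>
          pvBGo xs rest (i + 1)
            (if w == "}" then jt.insert (i : Int) j else jt.insert j (i : Int))

def make_jump_table_alt (parsed_data : List String) : List (Int × Int) :=
  match pvBGo parsed_data parsed_data 0 PySem.Dict.empty with
  | some jt => jt.items
  | none => []   -- Python raises IndexError here; excluded by Pre_

-- ===== PRECONDITION & SPEC =====
-- Pre_ excludes exactly the inputs where a closing bracket has no earlier matching opener of
-- its own kind: there A's list.pop() on an empty stack and B's exhausted backward scan both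
-- raise IndexError.
def Pre_make_jump_table (parsed_data : List String) : Prop :=
  ∀ n ≤ parsed_data.length,
    (parsed_data.take n).count ")" ≤ (parsed_data.take n).count "(" ∧
    (parsed_data.take n).count "]" ≤ (parsed_data.take n).count "[" ∧
    (parsed_data.take n).count "}" ≤ (parsed_data.take n).count "{"
instance (parsed_data : List String) : Decidable (Pre_make_jump_table parsed_data) := by
  unfold Pre_make_jump_table; infer_instance

def pvWitness_make_jump_table : List String := ["{", "(", "x", ")", "[", "]", "}"]

def Spec_make_jump_table (parsed_data : List String) (out : List (Int × Int)) : Prop := out = make_jump_table_alt parsed_data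
instance (parsed_data : List String) (out : List (Int × Int)) : Decidable (Spec_make_jump_table parsed_data out) := by unfold Spec_make_jump_table; infer_instance

-- ===== CLAIM (what is proved, stated in full; the proofs are below) =====
def Claim_equal_make_jump_table : Prop := ∀ (parsed_data : List String), Dom_make_jump_table parsed_data → Pre_make_jump_table parsed_data → Spec_make_jump_table parsed_data (make_jump_table parsed_data)

-- ===== LEMMAS AND PROOFS =====

-- the abstract per-bracket-pair stack after the first n words (top at head; pop on empty
-- is a no-op here — at that very step A's fold and B's scan both become `none`)
def pvStk (xs : List String) (op cl : String) : Nat → List Int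
  | 0 => []
  | n + 1 =>
    let s := pvStk xs op cl n
    match xs[n]? with
    | none => s
    | some w => if w == op then (n : Int) :: s else if w == cl then s.tail else s

-- (some a).bind f reduces
theorem pv_bind_some {α β : Type} (a : α) (f : α → Option β) : (some a).bind f = f a := rfl

-- a fold of `bind step` over any list propagates `none`
theorem pv_foldl_bind_none {α β : Type} (f : β → α → Option α) (l : List β) :
    l.foldl (fun acc x => acc.bind (f x)) none = none := by
  induction l with
  | nil => rfl
  | cons x l ih => simpa [List.foldl] using ih

-- B's backward scan reads off the abstract stack: depth d finds its (d+1)-th element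
theorem pv_find_stk (xs : List String) (op cl : String) (hne : op ≠ cl) :
    ∀ n, n ≤ xs.length → ∀ d, pvFind xs cl op n d = (pvStk xs op cl n)[d]? := by
  intro n
  induction n with
  | zero => intro _ d; simp [pvFind, pvStk]
  | succ n ih =>
    intro hn d
    have hlt : n < xs.length := hn
    obtain ⟨w, hw⟩ : ∃ w, xs[n]? = some w := ⟨xs[n], List.getElem?_eq_getElem hlt⟩
    have ih' := ih (Nat.le_of_lt hlt)
    by_cases hcl : w = cl
    · have hop : (w == op) = false := by
        subst hcl; exact beq_eq_false_iff_ne.mpr (fun h => hne h.symm)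
      subst hcl
      simp only [pvFind, pvStk, hw, beq_self_eq_true, if_true, hop]
      rw [ih' (d + 1)]
      cases pvStk xs op w n with
      | nil => simp
      | cons a l => simp
    · by_cases hop : w = op
      · subst hop
        have hbcl : (w == cl) = false := beq_eq_false_iff_ne.mpr hcl
        cases d with
        | zero => simp [pvFind, pvStk, hw, hbcl]
        | succ k => simp [pvFind, pvStk, hw, hbcl, ih' k]
      · have hbcl : (w == cl) = false := beq_eq_false_iff_ne.mpr hcl
        have hbop : (w == op) = false := beq_eq_false_iff_ne.mpr hop
        simp only [pvFind, pvStk, hw, hbcl, hbop]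
        exact ih' d

-- main coupling: starting at position n with A's three buffers equal to the abstract stacks,
-- the jump_table component of A's remaining fold equals B's remaining loop
theorem pv_main (xs : List String) :
    ∀ (ws : List String) (n : Nat) (jt : PySem.Dict Int Int),
    xs.drop n = ws →
    Option.map (fun st => st.1)
      ((PySem.List.enumerate ws (n : Int)).foldl (fun acc iw => acc.bind (pvAStep iw))
        (some (jt, pvStk xs "(" ")" n, pvStk xs "[" "]" n, pvStk xs "{" "}" n)))
    = pvBGo xs ws n jt := by
  intro ws
  induction ws with
  | nil => intro n jt _; simp [PySem.List.enumerate_nil, pvBGo]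
  | cons w rest ih =>
    intro n jt hdrop
    have hlt : n < xs.length := by
      by_contra h
      rw [List.drop_eq_nil_of_le (Nat.le_of_not_lt h)] at hdrop
      cases hdrop
    have hw : xs[n]? = some w := by
      have h0 : (xs.drop n)[0]? = some w := by rw [hdrop]; rfl
      rwa [List.getElem?_drop, Nat.add_zero] at h0
    have hrest : xs.drop (n + 1) = rest := by
      have h := congrArg List.tail hdrop
      rwa [List.tail_drop] at h
    have hs1 : pvStk xs "(" ")" (n + 1) =
        (if w == "(" then (n : Int) :: pvStk xs "(" ")" n
         else if w == ")" then (pvStk xs "(" ")" n).tail else pvStk xs "(" ")" n) := by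
      simp [pvStk, hw]
    have hs2 : pvStk xs "[" "]" (n + 1) =
        (if w == "[" then (n : Int) :: pvStk xs "[" "]" n
         else if w == "]" then (pvStk xs "[" "]" n).tail else pvStk xs "[" "]" n) := by
      simp [pvStk, hw]
    have hs3 : pvStk xs "{" "}" (n + 1) =
        (if w == "{" then (n : Int) :: pvStk xs "{" "}" n
         else if w == "}" then (pvStk xs "{" "}" n).tail else pvStk xs "{" "}" n) := by
      simp [pvStk, hw]
    rw [PySem.List.enumerate_cons]
    simp only [List.foldl_cons, pv_bind_some]
    have hfind1 := pv_find_stk xs "(" ")" (by decide) n (Nat.le_of_lt hlt)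
    have hfind2 := pv_find_stk xs "[" "]" (by decide) n (Nat.le_of_lt hlt)
    have hfind3 := pv_find_stk xs "{" "}" (by decide) n (Nat.le_of_lt hlt)
    have hcast : ((n : Int) + 1) = ((n + 1 : Nat) : Int) := by push_cast; ring
    by_cases h1 : w = "("
    · subst h1
      have hstep : pvAStep ((n : Int), "(")
          (jt, pvStk xs "(" ")" n, pvStk xs "[" "]" n, pvStk xs "{" "}" n)
          = some (jt, (n : Int) :: pvStk xs "(" ")" n, pvStk xs "[" "]" n, pvStk xs "{" "}" n) := by
        simp [pvAStep]
      have hB : pvBGo xs ("(" :: rest) n jt = pvBGo xs rest (n + 1) jt := by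
        simp [pvBGo, pvOpenerOf]
      rw [hstep, hB, hcast, ← ih (n + 1) jt hrest, hs1, hs2, hs3]
      simp
    · by_cases h2 : w = ")"
      · subst h2
        cases hstk : pvStk xs "(" ")" n with
        | nil =>
          have hf : pvFind xs ")" "(" n 0 = none := by rw [hfind1 0, hstk]; rfl
          have hB : pvBGo xs (")" :: rest) n jt = none := by
            simp [pvBGo, pvOpenerOf, hf]
          have hstep : pvAStep ((n : Int), ")")
              (jt, [], pvStk xs "[" "]" n, pvStk xs "{" "}" n) = none := by
            simp [pvAStep]
          rw [hstep, pv_foldl_bind_none, hB]; rfl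
        | cons t r =>
          have hf : pvFind xs ")" "(" n 0 = some t := by rw [hfind1 0, hstk]; rfl
          have hB : pvBGo xs (")" :: rest) n jt
              = pvBGo xs rest (n + 1) (jt.insert t (n : Int)) := by
            simp [pvBGo, pvOpenerOf, hf]
          have hstep : pvAStep ((n : Int), ")")
              (jt, t :: r, pvStk xs "[" "]" n, pvStk xs "{" "}" n)
              = some (jt.insert t (n : Int), r, pvStk xs "[" "]" n, pvStk xs "{" "}" n) := by
            simp [pvAStep]
          rw [hstep, hB, hcast, ← ih (n + 1) (jt.insert t (n : Int)) hrest,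
            hs1, hs2, hs3, hstk]
          simp
      · by_cases h3 : w = "["
        · subst h3
          have hstep : pvAStep ((n : Int), "[")
              (jt, pvStk xs "(" ")" n, pvStk xs "[" "]" n, pvStk xs "{" "}" n)
              = some (jt, pvStk xs "(" ")" n, (n : Int) :: pvStk xs "[" "]" n,
                  pvStk xs "{" "}" n) := by
            simp [pvAStep]
          have hB : pvBGo xs ("[" :: rest) n jt = pvBGo xs rest (n + 1) jt := by
            simp [pvBGo, pvOpenerOf]
          rw [hstep, hB, hcast, ← ih (n + 1) jt hrest, hs1, hs2, hs3]
          simp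
        · by_cases h4 : w = "]"
          · subst h4
            cases hstk : pvStk xs "[" "]" n with
            | nil =>
              have hf : pvFind xs "]" "[" n 0 = none := by rw [hfind2 0, hstk]; rfl
              have hB : pvBGo xs ("]" :: rest) n jt = none := by
                simp [pvBGo, pvOpenerOf, hf]
              have hstep : pvAStep ((n : Int), "]")
                  (jt, pvStk xs "(" ")" n, [], pvStk xs "{" "}" n) = none := by
                simp [pvAStep]
              rw [hstep, pv_foldl_bind_none, hB]; rfl
            | cons t r =>
              have hf : pvFind xs "]" "[" n 0 = some t := by rw [hfind2 0, hstk]; rfl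
              have hB : pvBGo xs ("]" :: rest) n jt
                  = pvBGo xs rest (n + 1) (jt.insert t (n : Int)) := by
                simp [pvBGo, pvOpenerOf, hf]
              have hstep : pvAStep ((n : Int), "]")
                  (jt, pvStk xs "(" ")" n, t :: r, pvStk xs "{" "}" n)
                  = some (jt.insert t (n : Int), pvStk xs "(" ")" n, r,
                      pvStk xs "{" "}" n) := by
                simp [pvAStep]
              rw [hstep, hB, hcast, ← ih (n + 1) (jt.insert t (n : Int)) hrest,
                hs1, hs2, hs3, hstk]
              simp
          · by_cases h5 : w = "{"
            · subst h5
              have hstep : pvAStep ((n : Int), "{")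
                  (jt, pvStk xs "(" ")" n, pvStk xs "[" "]" n, pvStk xs "{" "}" n)
                  = some (jt, pvStk xs "(" ")" n, pvStk xs "[" "]" n,
                      (n : Int) :: pvStk xs "{" "}" n) := by
                simp [pvAStep]
              have hB : pvBGo xs ("{" :: rest) n jt = pvBGo xs rest (n + 1) jt := by
                simp [pvBGo, pvOpenerOf]
              rw [hstep, hB, hcast, ← ih (n + 1) jt hrest, hs1, hs2, hs3]
              simp
            · by_cases h6 : w = "}"
              · subst h6
                cases hstk : pvStk xs "{" "}" n with
                | nil =>
                  have hf : pvFind xs "}" "{" n 0 = none := by rw [hfind3 0, hstk]; rfl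
                  have hB : pvBGo xs ("}" :: rest) n jt = none := by
                    simp [pvBGo, pvOpenerOf, hf]
                  have hstep : pvAStep ((n : Int), "}")
                      (jt, pvStk xs "(" ")" n, pvStk xs "[" "]" n, []) = none := by
                    simp [pvAStep]
                  rw [hstep, pv_foldl_bind_none, hB]; rfl
                | cons t r =>
                  have hf : pvFind xs "}" "{" n 0 = some t := by rw [hfind3 0, hstk]; rfl
                  have hB : pvBGo xs ("}" :: rest) n jt
                      = pvBGo xs rest (n + 1) (jt.insert (n : Int) t) := by
                    simp [pvBGo, pvOpenerOf, hf]
                  have hstep : pvAStep ((n : Int), "}")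
                      (jt, pvStk xs "(" ")" n, pvStk xs "[" "]" n, t :: r)
                      = some (jt.insert (n : Int) t, pvStk xs "(" ")" n,
                          pvStk xs "[" "]" n, r) := by
                    simp [pvAStep]
                  rw [hstep, hB, hcast, ← ih (n + 1) (jt.insert (n : Int) t) hrest,
                    hs1, hs2, hs3, hstk]
                  simp
              · have b1 : (w == "(") = false := beq_eq_false_iff_ne.mpr h1
                have b2 : (w == ")") = false := beq_eq_false_iff_ne.mpr h2
                have b3 : (w == "[") = false := beq_eq_false_iff_ne.mpr h3
                have b4 : (w == "]") = false := beq_eq_false_iff_ne.mpr h4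
                have b5 : (w == "{") = false := beq_eq_false_iff_ne.mpr h5
                have b6 : (w == "}") = false := beq_eq_false_iff_ne.mpr h6
                have hstep : pvAStep ((n : Int), w)
                    (jt, pvStk xs "(" ")" n, pvStk xs "[" "]" n, pvStk xs "{" "}" n)
                    = some (jt, pvStk xs "(" ")" n, pvStk xs "[" "]" n,
                        pvStk xs "{" "}" n) := by
                  simp [pvAStep, b1, b2, b3, b4, b5, b6]
                have hB : pvBGo xs (w :: rest) n jt = pvBGo xs rest (n + 1) jt := by
                  simp [pvBGo, pvOpenerOf, b2, b4, b6]
                rw [hstep, hB, hcast, ← ih (n + 1) jt hrest, hs1, hs2, hs3]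
                simp [b1, b2, b3, b4, b5, b6]

-- ===== VERDICT (by name: the statement is the Claim_ definition above) =====
theorem make_jump_table_spec : Claim_equal_make_jump_table := by
  intro pd _ _
  unfold Spec_make_jump_table
  have h := pv_main pd pd 0 PySem.Dict.empty rfl
  have hstk0 : ∀ op cl, pvStk pd op cl 0 = [] := fun _ _ => rfl
  rw [hstk0, hstk0, hstk0] at h
  unfold make_jump_table make_jump_table_alt
  rw [← h]
  cases (PySem.List.enumerate pd (0 : Int)).foldl (fun acc iw => acc.bind (pvAStep iw))
      (some (PySem.Dict.empty, [], [], [])) with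
  | none => rfl
  | some st => rfl
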